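-- pv_equiv track=rewrite | github.com/amai2222/cp_jq4 | common_api.py | _check_filter_conditions
-- ===== SOURCE A (Python) =====
-- from typing import List, Dict, Tuple, Optional, Any
--
-- def _check_filter_conditions(bet: str, filters: Dict[str, Any]) -> bool:
--     """检查过滤条件"""
--     # 胜平负统计
--     win_count = bet.count('3')
--     draw_count = bet.count('1')
--     lose_count = bet.count('0')
--
--     # 积分和
--     total_points = win_count * 3 + draw_count * 1
--
--     # 断点数
--     breaks = sum(1 for i in range(len(bet) - 1) if bet[i] != bet[i+1])
--
--     # 检查条件
--     if 'min_wins' in filters and win_count < filters['min_wins']: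
--         return False
--     if 'max_wins' in filters and win_count > filters['max_wins']:
--         return False
--     if 'min_draws' in filters and draw_count < filters['min_draws']:
--         return False
--     if 'max_draws' in filters and draw_count > filters['max_draws']:
--         return False
--     if 'min_loses' in filters and lose_count < filters['min_loses']:
--         return False
--     if 'max_loses' in filters and lose_count > filters['max_loses']:
--         return False
--     if 'min_points' in filters and total_points < filters['min_points']:
--         return False
--     if 'max_points' in filters and total_points > filters['max_points']:
--         return False
--     if 'min_breaks' in filters and breaks < filters['min_breaks']:
--         return False
--     if 'max_breaks' in filters and breaks > filters['max_breaks']: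
--         return False
--
--     return True
-- ===== SOURCE B (Python) =====
-- from typing import Dict, Any
--
-- def _check_filter_conditions(bet: str, filters: Dict[str, Any]) -> bool:
--     """Run-length-encode bet; derive counts from run totals and breaks from the
--     number of runs; validate each statistic as interval membership via dict .get
--     with the value itself as default."""
--     runs = []
--     for ch in bet:
--         if runs and runs[-1][0] == ch:
--             runs[-1][1] += 1
--         else:
--             runs.append([ch, 1])
--     totals = {}
--     for ch, n in runs:
--         totals[ch] = totals.get(ch, 0) + n
--     win = totals.get('3', 0)
--     draw = totals.get('1', 0)
--     lose = totals.get('0', 0)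
--     stats = [('wins', win), ('draws', draw), ('loses', lose),
--              ('points', 3 * win + draw), ('breaks', max(len(runs) - 1, 0))]
--     for name, v in stats:
--         if not (filters.get('min_' + name, v) <= v <= filters.get('max_' + name, v)):
--             return False
--     return True
-- ===== Notes on version B (the rewrite author's own statement) =====
-- stated objective: alternative
-- what changed: B run-length-encodes the bet string once, derives win/draw/lose counts by aggregating run lengths into a dict and breaks as (number of runs - 1), then validates each statistic as interval membership using filters.get with the value itself as default, instead of A's three .count() scans, index-pair break comprehension and ten-branch if-ladder.
import Mathlib
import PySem

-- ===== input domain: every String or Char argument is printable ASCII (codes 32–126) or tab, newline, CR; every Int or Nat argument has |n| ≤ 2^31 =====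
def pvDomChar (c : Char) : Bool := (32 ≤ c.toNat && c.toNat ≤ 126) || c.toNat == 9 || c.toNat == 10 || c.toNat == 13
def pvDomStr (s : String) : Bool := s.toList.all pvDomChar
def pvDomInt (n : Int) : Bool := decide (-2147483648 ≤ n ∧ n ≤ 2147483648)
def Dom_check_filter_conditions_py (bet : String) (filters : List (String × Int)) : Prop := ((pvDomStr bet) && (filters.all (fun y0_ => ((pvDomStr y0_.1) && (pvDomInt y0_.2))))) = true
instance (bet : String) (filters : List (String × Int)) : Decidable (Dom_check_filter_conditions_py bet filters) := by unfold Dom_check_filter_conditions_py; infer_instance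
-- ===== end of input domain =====

-- B run-length-encodes bet once, aggregates run lengths into a dict for the counts,
-- takes breaks = number of runs - 1, and validates each statistic as interval
-- membership via dict-get with the value itself as default ("alternative").

-- ===== PORT A =====
-- `'k' in filters and p(filters['k'])`
def pyFilterHit (f : PySem.Dict String Int) (k : String) (p : Int → Bool) : Bool :=
  match f.get? k with
  | some v => p v
  | none => false

def check_filter_conditions_py (bet : String) (filters : List (String × Int)) : Bool :=
  let f := PySem.Dict.ofList filters
  let win_count : Int := (PySem.Str.count bet "3" : Int)
  let draw_count : Int := (PySem.Str.count bet "1" : Int)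
  let lose_count : Int := (PySem.Str.count bet "0" : Int)
  let total_points : Int := win_count * 3 + draw_count * 1
  let breaks : Int := (PySem.List.pyRange 0 ((PySem.Str.len bet : Int) - 1) 1).foldl
      (fun acc i => if PySem.Str.pyGet? bet i ≠ PySem.Str.pyGet? bet (i + 1) then acc + 1 else acc) 0
  if pyFilterHit f "min_wins" (fun v => win_count < v) then false
  else if pyFilterHit f "max_wins" (fun v => win_count > v) then false
  else if pyFilterHit f "min_draws" (fun v => draw_count < v) then false
  else if pyFilterHit f "max_draws" (fun v => draw_count > v) then false
  else if pyFilterHit f "min_loses" (fun v => lose_count < v) then false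
  else if pyFilterHit f "max_loses" (fun v => lose_count > v) then false
  else if pyFilterHit f "min_points" (fun v => total_points < v) then false
  else if pyFilterHit f "max_points" (fun v => total_points > v) then false
  else if pyFilterHit f "min_breaks" (fun v => breaks < v) then false
  else if pyFilterHit f "max_breaks" (fun v => breaks > v) then false
  else true

-- ===== PORT B =====
-- one step of the run-length encoder: extend the last run or open a new one
def rleStep (runs : List (Char × Int)) (ch : Char) : List (Char × Int) :=
  match runs.getLast? with
  | some (c, n) => if c == ch then runs.dropLast ++ [(c, n + 1)] else runs ++ [(ch, 1)]
  | none => [(ch, 1)]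

def check_filter_conditions_py_alt (bet : String) (filters : List (String × Int)) : Bool :=
  let f := PySem.Dict.ofList filters
  let runs := bet.toList.foldl rleStep []
  let totals := runs.foldl
      (fun (d : PySem.Dict Char Int) p => d.insert p.1 (d.getD p.1 0 + p.2)) PySem.Dict.empty
  let win := totals.getD '3' 0
  let draw := totals.getD '1' 0
  let lose := totals.getD '0' 0
  let stats : List (String × Int) :=
    [("wins", win), ("draws", draw), ("loses", lose),
     ("points", 3 * win + draw), ("breaks", max ((runs.length : Int) - 1) 0)]
  stats.all (fun s =>
    decide (f.getD ("min_" ++ s.1) s.2 ≤ s.2) && decide (s.2 ≤ f.getD ("max_" ++ s.1) s.2))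

-- ===== PRECONDITION & SPEC =====
def Spec_check_filter_conditions_py (bet : String) (filters : List (String × Int)) (out : Bool) : Prop := out = check_filter_conditions_py_alt bet filters
instance (bet : String) (filters : List (String × Int)) (out : Bool) : Decidable (Spec_check_filter_conditions_py bet filters out) := by unfold Spec_check_filter_conditions_py; infer_instance

-- ===== CLAIM (what is proved, stated in full; the proofs are below) =====
def Claim_equal_check_filter_conditions_py : Prop := ∀ (bet : String) (filters : List (String × Int)), Dom_check_filter_conditions_py bet filters → Spec_check_filter_conditions_py bet filters (check_filter_conditions_py bet filters)

-- ===== LEMMAS AND PROOFS =====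

-- Str.count with a single-character needle is List.count
theorem count_go_singleton (c : Char) (l : List Char) : ∀ (fuel acc : Nat),
    l.length ≤ fuel → PySem.Chars.count.go [c] fuel l acc = acc + l.count c := by
  induction l with
  | nil =>
    intro fuel acc _
    cases fuel <;> simp [PySem.Chars.count.go]
  | cons h t ih =>
    intro fuel acc hf
    cases fuel with
    | zero => simp at hf
    | succ n =>
      simp only [PySem.Chars.count.go]
      by_cases hc : c = h
      · subst hc
        simp only [List.isPrefixOf, BEq.rfl, Bool.true_and, if_true]
        rw [show List.drop [c].length (c :: t) = t from rfl]
        rw [ih n (acc + 1) (by simpa using hf)]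
        simp [List.count_cons]
        omega
      · have hpre : ([c].isPrefixOf (h :: t)) = false := by
          simp [List.isPrefixOf, hc]
        simp only [hpre, Bool.false_eq_true, if_false]
        rw [ih n acc (by simpa using hf)]
        simp only [List.count_cons]
        have : ¬(h == c) = true := by simp; exact fun h' => hc h'.symm
        simp [this]

theorem count_singleton (l : List Char) (c : Char) :
    PySem.Chars.count l [c] = l.count c := by
  simp only [PySem.Chars.count, List.isEmpty_cons, Bool.false_eq_true, if_false]
  simpa using count_go_singleton c l l.length 0 le_rfl

-- adjacent-difference count, from a known previous character
def adjB : List Char → Char → Int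
  | [], _ => 0
  | x :: xs, p => (if x ≠ p then 1 else 0) + adjB xs x

theorem adjB_nonneg (l : List Char) : ∀ p, 0 ≤ adjB l p := by
  induction l with
  | nil => intro p; simp [adjB]
  | cons x xs ih => intro p; have := ih x; simp only [adjB]; split <;> omega

-- A's index fold over pairs equals adjB
theorem zip_fold_adjB (cs : List Char) : ∀ (p : Char) (a : Int),
    ((p :: cs).zip cs).foldl (fun acc q => if q.1 ≠ q.2 then acc + 1 else acc) a = a + adjB cs p := by
  induction cs with
  | nil => intro p a; simp [adjB]
  | cons x xs ih =>
    intro p a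
    have : (p :: x :: xs).zip (x :: xs) = (p, x) :: ((x :: xs).zip xs) := by simp
    rw [this]
    simp only [List.foldl_cons]
    rw [ih]
    simp only [adjB]
    by_cases h : x = p <;> simp [h, Ne, eq_comm] <;> omega

theorem rangeBreaks_eq (l : List Char) :
    (PySem.List.pyRange 0 ((l.length : Int) - 1) 1).foldl
      (fun (acc : Int) i => if PySem.List.pyGet? l i ≠ PySem.List.pyGet? l (i + 1) then acc + 1 else acc) 0 =
    (l.zip l.tail).foldl (fun (acc : Int) q => if q.1 ≠ q.2 then acc + 1 else acc) 0 := by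
  cases l with
  | nil => rw [PySem.List.pyRange_one_eq_nil (by norm_num)]; simp
  | cons c cs =>
    simp only [List.tail_cons]
    have hlen : ((c :: cs).length : Int) - 1 = ((((c :: cs).zip cs).length : Int)) := by
      simp [List.length_zip]
    rw [hlen]
    rw [PySem.List.foldl_congr_mem _ _
        (fun acc j => if (PySem.List.pyGetD ((c :: cs).zip cs) j (c, c)).1 ≠
            (PySem.List.pyGetD ((c :: cs).zip cs) j (c, c)).2 then acc + 1 else acc) 0 ?_]
    · exact PySem.List.foldl_pyRange_zero_pyGetD' ((c :: cs).zip cs) (c, c)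
        (fun acc q => if q.1 ≠ q.2 then acc + 1 else acc) 0
    · intro acc i hi
      rw [PySem.List.mem_pyRange_one] at hi
      obtain ⟨h0, h1⟩ := hi
      have hzlen : ((c :: cs).zip cs).length = cs.length := by simp [List.length_zip]
      have hiN : i.toNat < cs.length := by omega
      beta_reduce
      rw [PySem.List.pyGetD_eq_getElem _ _ h0 (by omega), List.getElem_zip]
      rw [PySem.List.pyGet?_eq_some_getElem _ h0 (by simp; omega)]
      rw [PySem.List.pyGet?_eq_some_getElem _ (by omega) (by simp; omega)]
      have ht : (i + 1).toNat = i.toNat + 1 := by omega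
      simp only [ht, List.getElem_cons_succ, ne_eq, Option.some.injEq]

-- canonical recursive run-length encoder
def rleF : Char → Int → List Char → List (Char × Int)
  | c, n, [] => [(c, n)]
  | c, n, x :: xs => if x = c then rleF c (n + 1) xs else (c, n) :: rleF x 1 xs

-- B's foldl builds exactly rleF once a run is open
theorem rleStep_concat (rs : List (Char × Int)) (c : Char) (n : Int) (x : Char) :
    rleStep (rs ++ [(c, n)]) x =
      if x = c then rs ++ [(c, n + 1)] else (rs ++ [(c, n)]) ++ [(x, 1)] := by
  simp only [rleStep, List.getLast?_concat, List.dropLast_concat, beq_iff_eq]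
  by_cases h : x = c
  · simp [h]
  · have h' : ¬ c = x := fun hh => h hh.symm
    simp [h, h']

theorem foldl_rleStep (l : List Char) : ∀ (rs : List (Char × Int)) (c : Char) (n : Int),
    l.foldl rleStep (rs ++ [(c, n)]) = rs ++ rleF c n l := by
  induction l with
  | nil => intro rs c n; simp [rleF]
  | cons x xs ih =>
    intro rs c n
    simp only [List.foldl_cons, rleStep_concat, rleF]
    by_cases h : x = c
    · simp only [h, if_true]; exact ih rs c (n + 1)
    · simp only [h, if_false]
      rw [ih (rs ++ [(c, n)]) x 1, List.append_assoc]
      rfl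

-- weighted sum of run lengths for one character
def wsum (ch : Char) : List (Char × Int) → Int
  | [] => 0
  | p :: ps => (if p.1 = ch then p.2 else 0) + wsum ch ps

theorem wsum_rleF (ch : Char) (l : List Char) : ∀ (c : Char) (n : Int),
    wsum ch (rleF c n l) = (if c = ch then n else 0) + (l.count ch : Int) := by
  induction l with
  | nil => intro c n; simp [rleF, wsum]
  | cons x xs ih =>
    intro c n
    simp only [rleF]
    by_cases h : x = c
    · subst h
      rw [if_pos rfl, ih]
      by_cases hc : x = ch <;> simp [hc, List.count_cons] <;> push_cast <;> omega
    · rw [if_neg h]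
      simp only [wsum, ih]
      by_cases hx : x = ch <;> by_cases hc : c = ch <;>
        simp [hx, hc, List.count_cons] <;> push_cast <;> omega

theorem length_rleF (l : List Char) : ∀ (c : Char) (n : Int),
    ((rleF c n l).length : Int) = 1 + adjB l c := by
  induction l with
  | nil => intro c n; simp [rleF, adjB]
  | cons x xs ih =>
    intro c n
    simp only [rleF, adjB]
    by_cases h : x = c
    · subst h
      rw [if_pos rfl, ih]
      simp
    · rw [if_neg h]
      have hh := ih x 1
      simp only [ne_eq, h, not_false_eq_true, if_true, List.length_cons]
      push_cast
      omega

-- the totals dict accumulates wsum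
theorem getD_totals (rs : List (Char × Int)) : ∀ (d : PySem.Dict Char Int) (ch : Char),
    (rs.foldl (fun (d : PySem.Dict Char Int) p => d.insert p.1 (d.getD p.1 0 + p.2)) d).getD ch 0 =
      d.getD ch 0 + wsum ch rs := by
  induction rs with
  | nil => intro d ch; simp [wsum]
  | cons p ps ih =>
    intro d ch
    simp only [List.foldl_cons, wsum, ih, PySem.Dict.getD_insert]
    by_cases h : ch = p.1
    · subst h
      simp
      omega
    · have h' : ¬ p.1 = ch := fun hh => h hh.symm
      simp only [if_neg h, if_neg h']
      omega

-- per-statistic bridges: A's negated hit is B's interval side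
theorem entry_min (f : PySem.Dict String Int) (k : String) (x : Int) :
    (!pyFilterHit f k (fun v => x < v)) = decide (f.getD k x ≤ x) := by
  rcases hk : f.get? k with _ | v
  · simp [pyFilterHit, PySem.Dict.getD, hk]
  · simp [pyFilterHit, PySem.Dict.getD, hk, ← decide_not, not_lt]

theorem entry_max (f : PySem.Dict String Int) (k : String) (x : Int) :
    (!pyFilterHit f k (fun v => x > v)) = decide (x ≤ f.getD k x) := by
  rcases hk : f.get? k with _ | v
  · simp [pyFilterHit, PySem.Dict.getD, hk]
  · simp [pyFilterHit, PySem.Dict.getD, hk, ← decide_not, not_lt]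

theorem hit_false_else (c : Bool) (rest : Bool) :
    (if c then false else rest) = ((!c) && rest) := by cases c <;> cases rest <;> rfl

-- the ten checks: A's if-ladder vs B's interval pass over the stats table
theorem checks_eq (f : PySem.Dict String Int) (w d l br : Int) :
    (if pyFilterHit f "min_wins" (fun v => w < v) then false
     else if pyFilterHit f "max_wins" (fun v => w > v) then false
     else if pyFilterHit f "min_draws" (fun v => d < v) then false
     else if pyFilterHit f "max_draws" (fun v => d > v) then false
     else if pyFilterHit f "min_loses" (fun v => l < v) then false
     else if pyFilterHit f "max_loses" (fun v => l > v) then false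
     else if pyFilterHit f "min_points" (fun v => w * 3 + d * 1 < v) then false
     else if pyFilterHit f "max_points" (fun v => w * 3 + d * 1 > v) then false
     else if pyFilterHit f "min_breaks" (fun v => br < v) then false
     else if pyFilterHit f "max_breaks" (fun v => br > v) then false
     else true) =
    ([("wins", w), ("draws", d), ("loses", l), ("points", 3 * w + d), ("breaks", br)] :
        List (String × Int)).all (fun s =>
      decide (f.getD ("min_" ++ s.1) s.2 ≤ s.2) && decide (s.2 ≤ f.getD ("max_" ++ s.1) s.2)) := by
  have hp : w * 3 + d * 1 = 3 * w + d := by ring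
  simp only [hp, hit_false_else, List.all_cons, List.all_nil, Bool.and_true,
    show ("min_" ++ "wins" : String) = "min_wins" from rfl,
    show ("max_" ++ "wins" : String) = "max_wins" from rfl,
    show ("min_" ++ "draws" : String) = "min_draws" from rfl,
    show ("max_" ++ "draws" : String) = "max_draws" from rfl,
    show ("min_" ++ "loses" : String) = "min_loses" from rfl,
    show ("max_" ++ "loses" : String) = "max_loses" from rfl,
    show ("min_" ++ "points" : String) = "min_points" from rfl,
    show ("max_" ++ "points" : String) = "max_points" from rfl,
    show ("min_" ++ "breaks" : String) = "min_breaks" from rfl,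
    show ("max_" ++ "breaks" : String) = "max_breaks" from rfl,
    entry_min, entry_max, Bool.and_assoc]

-- ===== VERDICT (by name: the statement is the Claim_ definition above) =====
theorem check_filter_conditions_py_spec : Claim_equal_check_filter_conditions_py := by
  intro bet filters _
  unfold Spec_check_filter_conditions_py check_filter_conditions_py check_filter_conditions_py_alt
  have hbr : (PySem.List.pyRange 0 ((PySem.Str.len bet : Int) - 1) 1).foldl
      (fun acc i => if PySem.Str.pyGet? bet i ≠ PySem.Str.pyGet? bet (i + 1) then acc + 1 else acc)
      (0 : Int) =
      (bet.toList.zip bet.toList.tail).foldl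
        (fun acc q => if q.1 ≠ q.2 then acc + 1 else acc) (0 : Int) := by
    have h := rangeBreaks_eq bet.toList
    simp only [PySem.Str.pyGet?_eq, PySem.Str.len_eq, PySem.Chars.pyGet?_eq_listPyGet?,
      PySem.Chars.len_eq]
    exact h
  simp only [PySem.Str.count_eq, PySem.Str.pyGet?_eq, PySem.Str.len_eq,
    PySem.Chars.pyGet?_eq_listPyGet?, PySem.Chars.len_eq,
    show ("3" : String).toList = ['3'] from rfl, show ("1" : String).toList = ['1'] from rfl,
    show ("0" : String).toList = ['0'] from rfl, count_singleton] at hbr ⊢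
  simp only [hbr]
  generalize bet.toList = l
  cases l with
  | nil =>
    simp only [List.count_nil, List.tail_nil, List.zip_nil_right, List.foldl_nil,
      List.length_nil, Nat.cast_zero]
    have e3 : (PySem.Dict.empty : PySem.Dict Char Int).getD '3' 0 = 0 := rfl
    have e1 : (PySem.Dict.empty : PySem.Dict Char Int).getD '1' 0 = 0 := rfl
    have e0 : (PySem.Dict.empty : PySem.Dict Char Int).getD '0' 0 = 0 := rfl
    have hm : max ((0 : Int) - 1) 0 = 0 := by norm_num
    rw [e3, e1, e0, hm, checks_eq (PySem.Dict.ofList filters) 0 0 0 0]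
  | cons c cs =>
    simp only [List.tail_cons, zip_fold_adjB, zero_add]
    have hfold : (c :: cs).foldl rleStep [] = rleF c 1 cs := by
      have h0 : rleStep [] c = [(c, 1)] := rfl
      simpa [h0, List.foldl_cons] using foldl_rleStep cs [] c 1
    rw [hfold]
    have hmax : max ((((rleF c 1 cs).length : Int)) - 1) 0 = adjB cs c := by
      rw [length_rleF]
      have := adjB_nonneg cs c
      omega
    have hcnt : ∀ ch : Char, ((rleF c 1 cs).foldl
        (fun (d : PySem.Dict Char Int) p => d.insert p.1 (d.getD p.1 0 + p.2))
          PySem.Dict.empty).getD ch 0 = ((c :: cs).count ch : Int) := by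
      intro ch
      rw [getD_totals, wsum_rleF]
      have he : (PySem.Dict.empty : PySem.Dict Char Int).getD ch 0 = 0 := rfl
      rw [he]
      simp only [List.count_cons]
      by_cases h : c = ch
      · have hb : (c == ch) = true := by simpa using h
        simp [h, hb]
        push_cast
        omega
      · have hb : ¬ (c == ch) = true := by simpa using h
        simp [h, hb]
    rw [hcnt '3', hcnt '1', hcnt '0', hmax,
      checks_eq (PySem.Dict.ofList filters) (((c :: cs).count '3' : Int))
        (((c :: cs).count '1' : Int)) (((c :: cs).count '0' : Int)) (adjB cs c)]
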